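-- pv_equiv track=rewrite | github.com/iahuang/csap | preprocessing/util.py | group_brackets
-- ===== SOURCE A (Python) =====
-- class CharacterSets:
--     alpha_l = set("abcdefghijklmnopqrstuvwxyz")
--     alpha_u = set("ABCDEFGHIJKLMNOPQRSTUVWXYZ")
--     alpha = alpha_l.union(alpha_u)
--     alpha_v = alpha.union(set("_"))
--     num = set("0123456789")
--     num_f = set("0123456789.")
--     var = alpha.union(num).union(set("_."))
--     grouping = ["()", '""', "''", "[]", "{}"]
--     brackets = ["()", "[]", "{}"]
--
-- def group_brackets(s, valid_grouping=CharacterSets.brackets, escape_token="\\"):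
--     opening = {g[0]: g[1] for g in valid_grouping}
--     closing = {g[1]: g[0] for g in valid_grouping}
--     stack = []
--     block = ""
--     string = []
--     for c in escape(s, token=escape_token):
--         if c in opening:  # Open group ex: (
--             stack.append(c)
--
--         if c in closing:  # Close group ex: )
--             if closing[c] != stack[-1]:  # Unbalanced brackets
--                 raise SyntaxError("Unbalanced brackets")
--             stack = stack[:-1]
--             block += c
--             if stack == []:
--                 string.append(block)
--                 block = ""
--
--         elif stack == []:  # Is on root nesting, and delimiter is reached
--             string.append(c)
--         else:
--             block += c
--     return string
--
-- def escape(s, token="\\"):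
--     """ Group escaped characters into one cell """
--     chrs = []
--     i = 0
--     while i < len(s):
--         c = s[i]
--         if c == token:
--             chrs.append(c+s[i+1])
--             i += 1
--         else:
--             chrs.append(c)
--         i += 1
--     return chrs
-- ===== SOURCE B (Python) =====
-- def _tokenize(s, token):
--     """Split s into cells, an escape token absorbing the following character."""
--     toks = []
--     i = 0
--     while i < len(s):
--         if s[i] == token:
--             toks.append(s[i:i + 2])
--             i += 2
--         else:
--             toks.append(s[i])
--             i += 1
--     return toks
--
--
-- def group_brackets(s, valid_grouping=["()", "[]", "{}"], escape_token="\\"):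
--     # No bracket stack: an integer nesting depth over the opener/closer
--     # character sets decides where each root cell / bracket block ends.
--     openers = {g[0] for g in valid_grouping}
--     closers = {g[1] for g in valid_grouping}
--     out = []
--     depth = 0
--     group = []
--     for t in _tokenize(s, escape_token):
--         is_open = t in openers
--         is_close = t in closers
--         if is_open and not is_close:
--             depth += 1
--         elif is_close and not is_open:
--             if depth == 0:
--                 raise SyntaxError("Unbalanced brackets")
--             depth -= 1
--         # a token that is both (a quote) or neither leaves the depth unchanged
--         if depth == 0 and not (is_open and not is_close):
--             if group:
--                 group.append(t)
--                 out.append("".join(group))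
--                 group = []
--             else:
--                 out.append(t)
--         else:
--             group.append(t)
--     return out
-- ===== Notes on version B (the rewrite author's own statement) =====
-- stated objective: alternative
-- what changed: B drops A's bracket-matching stack entirely: it tokenizes once, then tracks only an integer nesting depth over opener/closer character sets, emitting a root cell or a block (its buffered tokens joined once) whenever the depth returns to 0, instead of A's stack pushes, stack[:-1] slicing and per-character string concatenation.
import Mathlib
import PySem

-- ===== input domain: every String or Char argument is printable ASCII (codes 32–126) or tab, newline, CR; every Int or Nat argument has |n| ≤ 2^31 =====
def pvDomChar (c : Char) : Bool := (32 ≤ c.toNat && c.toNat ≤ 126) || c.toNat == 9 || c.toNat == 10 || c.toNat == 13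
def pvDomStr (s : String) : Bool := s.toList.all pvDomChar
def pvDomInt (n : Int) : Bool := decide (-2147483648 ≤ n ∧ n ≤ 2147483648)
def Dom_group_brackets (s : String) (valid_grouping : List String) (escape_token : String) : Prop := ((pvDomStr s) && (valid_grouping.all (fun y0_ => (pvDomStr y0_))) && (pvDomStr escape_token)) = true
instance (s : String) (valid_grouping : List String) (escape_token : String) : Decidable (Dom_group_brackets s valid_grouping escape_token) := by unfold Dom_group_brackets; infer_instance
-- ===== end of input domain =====

-- B replaces A's bracket-matching stack by an integer nesting-depth counter over
-- opener/closer character sets, buffering each block's tokens in a list joined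
-- once per block (objective: alternative algorithm, same measured cost).
-- Both ports work on List Char and build the result Strings once at the very end.

-- ===== PORT A =====
-- A's dict comprehensions {g[0]: g[1]} / {g[1]: g[0]}
-- (none = IndexError when some grouping string has fewer than 2 characters)
def pvOpeningAux (d : PySem.Dict (List Char) (List Char)) :
    List String → Option (PySem.Dict (List Char) (List Char))
  | [] => some d
  | g :: rest =>
    match g.toList with
    | c0 :: c1 :: _ => pvOpeningAux (d.insert [c0] [c1]) rest
    | _ => none

def pvOpening (valid_grouping : List String) : Option (PySem.Dict (List Char) (List Char)) :=
  pvOpeningAux PySem.Dict.empty valid_grouping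

def pvClosingAux (d : PySem.Dict (List Char) (List Char)) :
    List String → Option (PySem.Dict (List Char) (List Char))
  | [] => some d
  | g :: rest =>
    match g.toList with
    | c0 :: c1 :: _ => pvClosingAux (d.insert [c1] [c0]) rest
    | _ => none

def pvClosing (valid_grouping : List String) : Option (PySem.Dict (List Char) (List Char)) :=
  pvClosingAux PySem.Dict.empty valid_grouping

-- A's helper `escape`: tokenize, pairing an escape token with the following char
-- (none = IndexError on s[i+1] for a trailing escape token)
def escapeA (token : String) : List Char → Option (List (List Char))
  | [] => some []
  | c :: rest =>
    if String.ofList [c] = token then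
      match rest with
      | [] => none
      | d :: rest' => (escapeA token rest').map (fun l => [c, d] :: l)
    else (escapeA token rest).map (fun l => [c] :: l)

-- A's for-loop over the escaped tokens, state (stack, block, string);
-- none = the SyntaxError / the IndexError of stack[-1] on an empty stack
def loopA (op cl : PySem.Dict (List Char) (List Char)) :
    List (List Char) → List (List Char) → List Char → List (List Char) → Option (List (List Char))
  | [], _stack, _block, out => some out
  | c :: ts, stack, block, out =>
    let stack1 := if (op.get? c).isSome then stack ++ [c] else stack
    match cl.get? c with
    | some v =>
      match PySem.List.pyGet? stack1 (-1) with
      | none => none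
      | some top =>
        if v ≠ top then none
        else
          let stack2 := PySem.List.slice stack1 none (some (-1))
          let block2 := block ++ c
          if stack2 = [] then loopA op cl ts stack2 [] (out ++ [block2])
          else loopA op cl ts stack2 block2 out
    | none =>
      if stack1 = [] then loopA op cl ts stack1 block (out ++ [c])
      else loopA op cl ts stack1 (block ++ c) out

def coreA (s : String) (valid_grouping : List String) (escape_token : String) :
    Option (List (List Char)) :=
  (pvOpening valid_grouping).bind fun op =>
    (pvClosing valid_grouping).bind fun cl =>
      (escapeA escape_token s.toList).bind fun ts =>
        loopA op cl ts [] [] []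

def group_brackets (s : String) (valid_grouping : List String) (escape_token : String) : List String :=
  ((coreA s valid_grouping escape_token).getD []).map String.ofList

-- ===== PORT B =====
-- B's `_tokenize`: s[i:i+2] for an escape token (total — a trailing escape
-- token yields the lone token, where A's escape raises)
def tokB (token : String) : List Char → List (List Char)
  | [] => []
  | c :: rest =>
    if String.ofList [c] = token then
      (c :: rest.take 1) :: tokB token (rest.drop 1)
    else [c] :: tokB token rest
  termination_by cs => cs.length
  decreasing_by all_goals simp only [List.length_drop, List.length_cons]; omega

-- B's set comprehensions {g[0] for g} / {g[1] for g} (none = IndexError)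
def openersAux (st : PySem.Set (List Char)) : List String → Option (PySem.Set (List Char))
  | [] => some st
  | g :: rest =>
    match g.toList with
    | c0 :: _ => openersAux (PySem.Set.add st [c0]) rest
    | _ => none

def openersB (valid_grouping : List String) : Option (PySem.Set (List Char)) :=
  openersAux PySem.Set.empty valid_grouping

def closersAux (st : PySem.Set (List Char)) : List String → Option (PySem.Set (List Char))
  | [] => some st
  | g :: rest =>
    match g.toList with
    | _ :: c1 :: _ => closersAux (PySem.Set.add st [c1]) rest
    | _ => none

def closersB (valid_grouping : List String) : Option (PySem.Set (List Char)) :=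
  closersAux PySem.Set.empty valid_grouping

-- B's for-loop: integer nesting depth instead of a stack, token buffer `group`
-- joined once per emitted block; none = the SyntaxError on a closer at depth 0
def loopBd (opn cls : PySem.Set (List Char)) :
    List (List Char) → Int → List (List Char) → List (List Char) → Option (List (List Char))
  | [], _depth, _group, out => some out
  | t :: ts, depth, group, out =>
    let isO := PySem.Set.contains opn t
    let isC := PySem.Set.contains cls t
    if isO && !isC then
      -- depth += 1 (≠ 0): the token joins the current group
      loopBd opn cls ts (depth + 1) (group ++ [t]) out
    else if isC && !isO then
      if depth = 0 then none
      else if depth - 1 = 0 then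
        if group ≠ [] then loopBd opn cls ts (depth - 1) [] (out ++ [(group ++ [t]).flatten])
        else loopBd opn cls ts (depth - 1) group (out ++ [t])
      else loopBd opn cls ts (depth - 1) (group ++ [t]) out
    else
      -- both or neither: depth unchanged
      if depth = 0 then
        if group ≠ [] then loopBd opn cls ts depth [] (out ++ [(group ++ [t]).flatten])
        else loopBd opn cls ts depth group (out ++ [t])
      else loopBd opn cls ts depth (group ++ [t]) out

def coreB (s : String) (valid_grouping : List String) (escape_token : String) :
    Option (List (List Char)) :=
  (openersB valid_grouping).bind fun opn =>
    (closersB valid_grouping).bind fun cls =>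
      loopBd opn cls (tokB escape_token s.toList) 0 [] []

def group_brackets_alt (s : String) (valid_grouping : List String) (escape_token : String) : List String :=
  ((coreB s valid_grouping escape_token).getD []).map String.ofList

-- ===== PRECONDITION & SPEC =====
-- one stack step of the balance check (no output built, only the stack tracked)
def pvPreStep (op cl : PySem.Dict (List Char) (List Char)) (t : List Char)
    (stack : List (List Char)) : Option (List (List Char)) :=
  let stack1 := if (op.get? t).isSome then t :: stack else stack
  match cl.get? t with
  | some v =>
    match stack1 with
    | [] => none
    | top :: stack2 => if v = top then some stack2 else none
  | none => some stack1

-- the string tokenizes (no trailing escape token) and its brackets are balanced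
def pvBal (op cl : PySem.Dict (List Char) (List Char)) (token : String) :
    List Char → List (List Char) → Bool
  | [], _stack => true
  | [c], stack =>
    if String.ofList [c] = token then false
    else
      match pvPreStep op cl [c] stack with
      | none => false
      | some _ => true
  | c :: d :: rest, stack =>
    if String.ofList [c] = token then
      match pvPreStep op cl [c, d] stack with
      | none => false
      | some st => pvBal op cl token rest st
    else
      match pvPreStep op cl [c] stack with
      | none => false
      | some st => pvBal op cl token (d :: rest) st

def pvPreB (s : String) (valid_grouping : List String) (escape_token : String) : Bool :=
  match pvOpening valid_grouping, pvClosing valid_grouping with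
  | some op, some cl => pvBal op cl escape_token s.toList []
  | _, _ => false

-- Pre_ excludes exactly the inputs where the Python A raises: a grouping string
-- shorter than 2 chars (IndexError building the dicts), a trailing escape token
-- (IndexError in escape), or a mismatched closer (SyntaxError, or IndexError
-- reading stack[-1] of an empty stack).
def Pre_group_brackets (s : String) (valid_grouping : List String) (escape_token : String) : Prop :=
  pvPreB s valid_grouping escape_token = true
instance (s : String) (valid_grouping : List String) (escape_token : String) : Decidable (Pre_group_brackets s valid_grouping escape_token) := by unfold Pre_group_brackets; infer_instance

def pvWitness_group_brackets : String × List String × String := ("a(b[c])d", ["()", "[]", "{}"], "\\")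

def Spec_group_brackets (s : String) (valid_grouping : List String) (escape_token : String) (out : List String) : Prop := out = group_brackets_alt s valid_grouping escape_token
instance (s : String) (valid_grouping : List String) (escape_token : String) (out : List String) : Decidable (Spec_group_brackets s valid_grouping escape_token out) := by unfold Spec_group_brackets; infer_instance

-- ===== CLAIM (what is proved, stated in full; the proofs are below) =====
def Claim_equal_group_brackets : Prop := ∀ (s : String) (valid_grouping : List String) (escape_token : String), Dom_group_brackets s valid_grouping escape_token → Pre_group_brackets s valid_grouping escape_token → Spec_group_brackets s valid_grouping escape_token (group_brackets s valid_grouping escape_token)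

-- ===== LEMMAS AND PROOFS =====

-- membership in a Set after add (specific combination used below)
theorem contains_add_eq (st : PySem.Set (List Char)) (x t : List Char) :
    PySem.Set.contains (PySem.Set.add st x) t
      = (decide (t = x) || PySem.Set.contains st t) := by
  simp [Bool.or_comm]

-- A's opening dict and B's openers set have the same keys/members
theorem openersAux_corr (vg : List String) :
    ∀ (d : PySem.Dict (List Char) (List Char)) (st : PySem.Set (List Char)),
      (∀ t, PySem.Set.contains st t = (d.get? t).isSome) →
      ∀ op, pvOpeningAux d vg = some op →
      ∃ opn, openersAux st vg = some opn ∧ ∀ t, PySem.Set.contains opn t = (op.get? t).isSome := by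
  induction vg with
  | nil =>
    intro d st h op hop
    cases hop
    exact ⟨st, rfl, h⟩
  | cons g rest ih =>
    intro d st h op hop
    cases hg : g.toList with
    | nil => simp [pvOpeningAux, hg] at hop
    | cons c0 gr =>
      cases gr with
      | nil => simp [pvOpeningAux, hg] at hop
      | cons c1 gr' =>
        simp only [pvOpeningAux, hg] at hop
        have hstep : ∀ t, PySem.Set.contains (PySem.Set.add st [c0]) t
            = ((d.insert [c0] [c1]).get? t).isSome := by
          intro t
          rw [contains_add_eq, PySem.Dict.get?_insert]
          by_cases ht : t = [c0]
          · subst ht; rw [if_pos rfl]; simp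
          · rw [if_neg ht, decide_eq_false ht, Bool.false_or]; exact h t
        obtain ⟨res, h1, h2⟩ := ih (d.insert [c0] [c1]) (PySem.Set.add st [c0]) hstep _ hop
        exact ⟨res, by simp [openersAux, hg, h1], h2⟩

theorem closersAux_corr (vg : List String) :
    ∀ (d : PySem.Dict (List Char) (List Char)) (st : PySem.Set (List Char)),
      (∀ t, PySem.Set.contains st t = (d.get? t).isSome) →
      ∀ cl, pvClosingAux d vg = some cl →
      ∃ cls, closersAux st vg = some cls ∧ ∀ t, PySem.Set.contains cls t = (cl.get? t).isSome := by
  induction vg with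
  | nil =>
    intro d st h cl hcl
    cases hcl
    exact ⟨st, rfl, h⟩
  | cons g rest ih =>
    intro d st h cl hcl
    cases hg : g.toList with
    | nil => simp [pvClosingAux, hg] at hcl
    | cons c0 gr =>
      cases gr with
      | nil => simp [pvClosingAux, hg] at hcl
      | cons c1 gr' =>
        simp only [pvClosingAux, hg] at hcl
        have hstep : ∀ t, PySem.Set.contains (PySem.Set.add st [c1]) t
            = ((d.insert [c1] [c0]).get? t).isSome := by
          intro t
          rw [contains_add_eq, PySem.Dict.get?_insert]
          by_cases ht : t = [c1]
          · subst ht; rw [if_pos rfl]; simp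
          · rw [if_neg ht, decide_eq_false ht, Bool.false_or]; exact h t
        obtain ⟨res, h1, h2⟩ := ih (d.insert [c1] [c0]) (PySem.Set.add st [c1]) hstep _ hcl
        exact ⟨res, by simp [closersAux, hg, h1], h2⟩

-- proof-only: one A-iteration written as a step function on the state
-- (stack top-first, block as a list of pieces)
def stepAB (op cl : PySem.Dict (List Char) (List Char)) (t : List Char)
    (stack block out : List (List Char)) :
    Option (List (List Char) × List (List Char) × List (List Char)) :=
  let stack1 := if (op.get? t).isSome then t :: stack else stack
  match cl.get? t with
  | some v =>
    match stack1 with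
    | [] => none
    | top :: stack2 =>
      if v ≠ top then none
      else if stack2 = [] then some (stack2, [], out ++ [(block ++ [t]).flatten])
      else some (stack2, block ++ [t], out)
  | none =>
    match stack1 with
    | [] => some ([], block, out ++ [t])
    | _ => some (stack1, block ++ [t], out)

-- one A-step on a token equals one stepAB, under stackA = stackB.reverse,
-- blockA = blockB.flatten (A keeps the stack top LAST and the block as one string)
theorem loopA_cons (op cl : PySem.Dict (List Char) (List Char)) (t : List Char)
    (ts stB blB out : List (List Char)) :
    loopA op cl (t :: ts) stB.reverse blB.flatten out =
      match stepAB op cl t stB blB out with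
      | none => none
      | some (st, bl, o) => loopA op cl ts st.reverse bl.flatten o := by
  cases hop : op.get? t with
  | some w =>
    simp only [loopA, stepAB, hop, Option.isSome_some, if_true, ← List.reverse_cons]
    cases hcl : cl.get? t with
    | none => simp [List.flatten_append]
    | some v =>
      rw [PySem.List.pyGet?_neg_one, List.getLast?_reverse]
      simp only [List.head?_cons]
      by_cases hv : v = t
      · subst hv
        rw [List.reverse_cons, PySem.List.slice_to_neg_one, List.dropLast_concat]
        by_cases hs : stB = [] <;> simp [hs, List.flatten_append]
      · simp [hv]
  | none =>
    simp only [loopA, stepAB, hop, Option.isSome_none, Bool.false_eq_true, if_false]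
    cases hcl : cl.get? t with
    | none =>
      cases stB with
      | nil => simp
      | cons a l => simp [List.flatten_append]
    | some v =>
      rw [PySem.List.pyGet?_neg_one, List.getLast?_reverse]
      cases stB with
      | nil => simp
      | cons top s2 =>
        simp only [List.head?_cons]
        by_cases hv : v = top
        · subst hv
          rw [List.reverse_cons, PySem.List.slice_to_neg_one, List.dropLast_concat]
          by_cases hs : s2 = [] <;> simp [hs, List.flatten_append]
        · simp [hv]

-- a successful stepAB is matched exactly by one B-iteration
theorem stepAB_loopBd (op cl : PySem.Dict (List Char) (List Char))
    (opn cls : PySem.Set (List Char))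
    (ho : ∀ t, PySem.Set.contains opn t = (op.get? t).isSome)
    (hc : ∀ t, PySem.Set.contains cls t = (cl.get? t).isSome)
    (t : List Char) (ts sA group out st bl o : List (List Char))
    (hinv : sA = [] → group = [])
    (h : stepAB op cl t sA group out = some (st, bl, o)) :
    loopBd opn cls (t :: ts) (sA.length : Int) group out
      = loopBd opn cls ts (st.length : Int) bl o ∧ (st = [] → bl = []) := by
  unfold stepAB at h
  simp only [loopBd, ho t, hc t]
  cases hO : op.get? t with
  | some w =>
    simp only [hO, Option.isSome_some, if_true] at h
    cases hC : cl.get? t with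
    | none =>
      simp only [hC, Option.some.injEq, Prod.mk.injEq] at h
      obtain ⟨h1, h2, h3⟩ := h
      subst h1 h2 h3
      have hlen : ((t :: sA).length : Int) = (sA.length : Int) + 1 := by
        push_cast [List.length_cons]; ring
      exact ⟨by simp [hO, hC, hlen], by simp⟩
    | some v =>
      simp only [hC] at h
      replace h : (if v ≠ t then (none : Option (List (List Char) × List (List Char) × List (List Char)))
          else if sA = [] then some (sA, [], out ++ [(group ++ [t]).flatten])
          else some (sA, group ++ [t], out)) = some (st, bl, o) := h
      by_cases hv : v = t
      · rw [if_neg (not_not_intro hv)] at h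
        by_cases hs : sA = []
        · subst hs
          rw [if_pos rfl] at h
          simp only [Option.some.injEq, Prod.mk.injEq] at h
          obtain ⟨h1, h2, h3⟩ := h
          subst h1 h2 h3
          have hg : group = [] := hinv rfl
          subst hg
          exact ⟨by simp [hO, hC], fun _ => rfl⟩
        · rw [if_neg hs] at h
          simp only [Option.some.injEq, Prod.mk.injEq] at h
          obtain ⟨h1, h2, h3⟩ := h
          subst h1 h2 h3
          have hlen : (sA.length : Int) ≠ 0 := by
            simpa [List.length_eq_zero_iff] using hs
          exact ⟨by simp [hO, hC, hlen, hs], fun hst => absurd hst hs⟩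
      · rw [if_pos hv] at h
        exact absurd h (by simp)
  | none =>
    simp only [hO, Option.isSome_none, Bool.false_eq_true, if_false] at h
    cases hC : cl.get? t with
    | none =>
      simp only [hC] at h
      cases sA with
      | nil =>
        simp only [Option.some.injEq, Prod.mk.injEq] at h
        obtain ⟨h1, h2, h3⟩ := h
        subst h1 h2 h3
        have hg : group = [] := hinv rfl
        subst hg
        exact ⟨by simp [hO, hC], fun _ => rfl⟩
      | cons a l =>
        simp only [Option.some.injEq, Prod.mk.injEq] at h
        obtain ⟨h1, h2, h3⟩ := h
        subst h1 h2 h3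
        have hlen : ((l.length : Int) + 1) ≠ 0 := by omega
        exact ⟨by simp [hO, hC, hlen], by simp⟩
    | some v =>
      simp only [hC] at h
      cases sA with
      | nil => exact absurd h (by simp)
      | cons top s2 =>
        replace h : (if v ≠ top then (none : Option (List (List Char) × List (List Char) × List (List Char)))
            else if s2 = [] then some (s2, [], out ++ [(group ++ [t]).flatten])
            else some (s2, group ++ [t], out)) = some (st, bl, o) := h
        by_cases hv : v = top
        · rw [if_neg (not_not_intro hv)] at h
          have hlen0 : (((top :: s2).length : Nat) : Int) ≠ 0 := by
            push_cast [List.length_cons]; omega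
          have hlen1 : (((top :: s2).length : Nat) : Int) - 1 = (s2.length : Int) := by
            push_cast [List.length_cons]; ring
          by_cases hs : s2 = []
          · subst hs
            rw [if_pos rfl] at h
            simp only [Option.some.injEq, Prod.mk.injEq] at h
            obtain ⟨h1, h2, h3⟩ := h
            subst h1 h2 h3
            refine ⟨?_, fun _ => rfl⟩
            by_cases hg : group = [] <;> simp [hO, hC, hg, hlen0, hlen1]
          · rw [if_neg hs] at h
            simp only [Option.some.injEq, Prod.mk.injEq] at h
            obtain ⟨h1, h2, h3⟩ := h
            subst h1 h2 h3
            have hlen : (s2.length : Int) ≠ 0 := by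
              simpa [List.length_eq_zero_iff] using hs
            have hne : ((s2.length : Int) + 1) ≠ 0 := by omega
            exact ⟨by simp [hO, hC, hne, hlen, hs], fun hst => absurd hst hs⟩
        · rw [if_pos hv] at h
          exact absurd h (by simp)

-- the main simulation: A's (stack, block) state versus B's (depth, group) state
theorem loopAB (op cl : PySem.Dict (List Char) (List Char)) (opn cls : PySem.Set (List Char))
    (ho : ∀ t, PySem.Set.contains opn t = (op.get? t).isSome)
    (hc : ∀ t, PySem.Set.contains cls t = (cl.get? t).isSome) :
    ∀ (ts sA group out : List (List Char)) (r : List (List Char)),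
      (sA = [] → group = []) →
      loopA op cl ts sA.reverse group.flatten out = some r →
      loopBd opn cls ts (sA.length : Int) group out = some r := by
  intro ts
  induction ts with
  | nil =>
    intro sA group out r _ h
    simpa [loopA, loopBd] using h
  | cons t ts ih =>
    intro sA group out r hinv h
    rw [loopA_cons] at h
    cases hs : stepAB op cl t sA group out with
    | none => rw [hs] at h; exact absurd h (by simp)
    | some stb =>
      obtain ⟨st, bl, o⟩ := stb
      rw [hs] at h
      obtain ⟨hstep, hinv'⟩ := stepAB_loopBd op cl opn cls ho hc t ts sA group out st bl o hinv hs
      rw [hstep]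
      exact ih st bl o r hinv' h

-- a successful pvPreStep is a successful stepAB (same next stack)
theorem pvPreStep_stepAB (op cl : PySem.Dict (List Char) (List Char))
    (t : List Char) (sA st2 : List (List Char))
    (h : pvPreStep op cl t sA = some st2) :
    ∀ (group out : List (List Char)),
      ∃ bl o, stepAB op cl t sA group out = some (st2, bl, o) := by
  intro group out
  unfold pvPreStep at h
  unfold stepAB
  cases hO : op.get? t with
  | some w =>
    simp only [hO, Option.isSome_some, if_true] at h ⊢
    cases hC : cl.get? t with
    | none =>
      simp only [hC, Option.some.injEq] at h ⊢
      subst h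
      exact ⟨group ++ [t], out, rfl⟩
    | some v =>
      simp only [hC] at h ⊢
      replace h : (if v = t then some sA else (none : Option (List (List Char)))) = some st2 := h
      by_cases hv : v = t
      · rw [if_pos hv] at h
        simp only [Option.some.injEq] at h
        subst h
        rw [if_neg (not_not_intro hv)]
        by_cases hs : sA = []
        · subst hs
          exact ⟨[], out ++ [(group ++ [t]).flatten], by rw [if_pos rfl]⟩
        · exact ⟨group ++ [t], out, by rw [if_neg hs]⟩
      · rw [if_neg hv] at h
        cases h
  | none =>
    simp only [hO, Option.isSome_none, Bool.false_eq_true, if_false] at h ⊢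
    cases hC : cl.get? t with
    | none =>
      simp only [hC, Option.some.injEq] at h ⊢
      subst h
      cases sA with
      | nil => exact ⟨group, out ++ [t], rfl⟩
      | cons a l => exact ⟨group ++ [t], out, rfl⟩
    | some v =>
      simp only [hC] at h ⊢
      cases sA with
      | nil =>
        replace h : (none : Option (List (List Char))) = some st2 := h
        cases h
      | cons top s2 =>
        replace h : (if v = top then some s2 else (none : Option (List (List Char)))) = some st2 := h
        by_cases hv : v = top
        · rw [if_pos hv] at h
          simp only [Option.some.injEq] at h
          subst h
          show ∃ bl o, (if v ≠ top then (none : Option (List (List Char) × List (List Char) × List (List Char)))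
              else if s2 = [] then some (s2, ([] : List (List Char)), out ++ [(group ++ [t]).flatten])
              else some (s2, group ++ [t], out)) = some (s2, bl, o)
          rw [if_neg (not_not_intro hv)]
          by_cases hs : s2 = []
          · subst hs
            exact ⟨[], out ++ [(group ++ [t]).flatten], by rw [if_pos rfl]⟩
          · exact ⟨group ++ [t], out, by rw [if_neg hs]⟩
        · rw [if_neg hv] at h
          cases h

-- a balanced string keeps loopA running to a result
theorem balA_some (op cl : PySem.Dict (List Char) (List Char)) (token : String) :
    ∀ (n : Nat) (cs : List Char), cs.length ≤ n →
    ∀ (stB : List (List Char)), pvBal op cl token cs stB = true →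
    ∀ (block : List (List Char)) (out : List (List Char)),
      ∃ ts r, escapeA token cs = some ts ∧ loopA op cl ts stB.reverse block.flatten out = some r := by
  intro n
  induction n with
  | zero =>
    intro cs hcs stB _ block out
    have : cs = [] := List.eq_nil_of_length_eq_zero (Nat.le_zero.mp hcs)
    subst this
    exact ⟨[], out, rfl, rfl⟩
  | succ n ih =>
    intro cs hcs stB hbal block out
    cases cs with
    | nil => exact ⟨[], out, rfl, rfl⟩
    | cons c rest =>
      cases rest with
      | nil =>
        simp only [pvBal] at hbal
        by_cases htok : String.ofList [c] = token
        · simp [htok] at hbal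
        · rw [if_neg htok] at hbal
          cases hps : pvPreStep op cl [c] stB with
          | none => simp [hps] at hbal
          | some st2 =>
            obtain ⟨bl, o, hstep⟩ := pvPreStep_stepAB op cl [c] stB st2 hps block out
            refine ⟨[[c]], o, by simp [escapeA, htok], ?_⟩
            rw [loopA_cons op cl [c] [] stB block out, hstep]
            rfl
      | cons d rest' =>
        simp only [pvBal] at hbal
        by_cases htok : String.ofList [c] = token
        · rw [if_pos htok] at hbal
          cases hps : pvPreStep op cl [c, d] stB with
          | none => simp [hps] at hbal
          | some st2 =>
            obtain ⟨bl, o, hstep⟩ := pvPreStep_stepAB op cl [c, d] stB st2 hps block out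
            obtain ⟨ts', r, hesc', hloop'⟩ :=
              ih rest' (by simp only [List.length_cons] at hcs ⊢; omega) st2
                (by simpa [hps] using hbal) bl o
            refine ⟨[c, d] :: ts', r, by simp [escapeA, htok, hesc'], ?_⟩
            rw [loopA_cons op cl [c, d] ts' stB block out, hstep]
            exact hloop'
        · rw [if_neg htok] at hbal
          cases hps : pvPreStep op cl [c] stB with
          | none => simp [hps] at hbal
          | some st2 =>
            obtain ⟨bl, o, hstep⟩ := pvPreStep_stepAB op cl [c] stB st2 hps block out
            obtain ⟨ts', r, hesc', hloop'⟩ :=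
              ih (d :: rest') (by simp only [List.length_cons] at hcs ⊢; omega) st2
                (by simpa [hps] using hbal) bl o
            refine ⟨[c] :: ts', r, by simp [escapeA, htok, hesc'], ?_⟩
            rw [loopA_cons op cl [c] ts' stB block out, hstep]
            exact hloop'

-- B's tokenizer agrees with A's escape wherever the latter returns
theorem tok_corr_fuel (token : String) :
    ∀ (n : Nat) (cs : List Char), cs.length ≤ n →
    ∀ (ts : List (List Char)), escapeA token cs = some ts → tokB token cs = ts := by
  intro n
  induction n with
  | zero =>
    intro cs hcs ts h
    have : cs = [] := List.eq_nil_of_length_eq_zero (Nat.le_zero.mp hcs)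
    subst this
    cases h
    rw [tokB]
  | succ n ih =>
    intro cs hcs ts h
    cases cs with
    | nil => cases h; rw [tokB]
    | cons c rest =>
      by_cases htok : String.ofList [c] = token
      · cases rest with
        | nil => simp [escapeA, htok] at h
        | cons d rest' =>
          simp only [escapeA] at h
          rw [if_pos htok] at h
          cases hesc : escapeA token rest' with
          | none => rw [hesc] at h; cases h
          | some l =>
            rw [hesc] at h
            simp only [Option.map_some, Option.some.injEq] at h
            subst h
            rw [tokB, if_pos htok]
            show [c, d] :: tokB token rest' = [c, d] :: l
            rw [ih rest' (by simp only [List.length_cons] at hcs ⊢; omega) l hesc]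
      · rw [escapeA.eq_def] at h
        simp only [] at h
        rw [if_neg htok] at h
        cases hesc : escapeA token rest with
        | none => rw [hesc] at h; cases h
        | some l =>
          rw [hesc] at h
          simp only [Option.map_some, Option.some.injEq] at h
          subst h
          rw [tokB, if_neg htok]
          rw [ih rest (by simp only [List.length_cons] at hcs ⊢; omega) l hesc]

theorem tok_corr (token : String) :
    ∀ (cs : List Char) (ts : List (List Char)),
      escapeA token cs = some ts → tokB token cs = ts := by
  intro cs ts h
  exact tok_corr_fuel token cs.length cs le_rfl ts h

-- ===== VERDICT (by name: the statement is the Claim_ definition above) =====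
theorem group_brackets_spec : Claim_equal_group_brackets := by
  intro s vg tok _hdom hpre
  unfold Pre_group_brackets pvPreB at hpre
  unfold Spec_group_brackets group_brackets group_brackets_alt
  cases hop : pvOpening vg with
  | none => rw [hop] at hpre; simp at hpre
  | some op =>
    cases hcl : pvClosing vg with
    | none => rw [hop, hcl] at hpre; simp at hpre
    | some cl =>
      rw [hop, hcl] at hpre
      obtain ⟨ts, r, hesc, hloop⟩ :=
        balA_some op cl tok s.toList.length s.toList le_rfl [] hpre [] []
      obtain ⟨opn, hopn, ho⟩ := openersAux_corr vg PySem.Dict.empty PySem.Set.empty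
        (by intro t; rfl) op hop
      obtain ⟨cls, hcls, hc⟩ := closersAux_corr vg PySem.Dict.empty PySem.Set.empty
        (by intro t; rfl) cl hcl
      have hB : loopBd opn cls ts 0 [] [] = some r :=
        loopAB op cl opn cls ho hc ts [] [] [] r (fun _ => rfl) hloop
      have hcoreA : coreA s vg tok = some r := by
        unfold coreA; rw [hop, hcl]; simp only [Option.bind_some]; rw [hesc]
        simpa using hloop
      have hcoreB : coreB s vg tok = some r := by
        unfold coreB openersB closersB; rw [hopn, hcls]; simp only [Option.bind_some]
        rw [tok_corr tok s.toList ts hesc]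
        simpa using hB
      rw [hcoreA, hcoreB]
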